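-- pv_equiv track=rewrite | github.com/sharktankmol/CSprojects | ClassProjects/Python/abirhan2_225_PA3.py | lifespan
-- ===== SOURCE A (Python) =====
-- def lifespan(fingers_list, num_toes):
--     life_years = 0
--     for i in fingers_list:#nested loop to evaluate each element in fingers_list
--         while i > 0:#stop when if i ever reaches 0
--             if i%num_toes == 0:
--                 life_years += 1#increment life (in years) 1 if it's a multiple
--             i -= 1#if it made it through, check for the next multiple
--     return life_years
-- ===== SOURCE B (Python) =====
-- def lifespan(fingers_list, num_toes):
--     # Closed form: multiples of num_toes in 1..i are exactly i // abs(num_toes).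
--     return sum(i // abs(num_toes) for i in fingers_list if i > 0)
-- ===== Notes on version B (the rewrite author's own statement) =====
-- stated objective: faster
-- what changed: Replaces the per-element countdown loop that tests each integer for divisibility with the closed form i // abs(num_toes), one floor division per element.
import Mathlib
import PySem

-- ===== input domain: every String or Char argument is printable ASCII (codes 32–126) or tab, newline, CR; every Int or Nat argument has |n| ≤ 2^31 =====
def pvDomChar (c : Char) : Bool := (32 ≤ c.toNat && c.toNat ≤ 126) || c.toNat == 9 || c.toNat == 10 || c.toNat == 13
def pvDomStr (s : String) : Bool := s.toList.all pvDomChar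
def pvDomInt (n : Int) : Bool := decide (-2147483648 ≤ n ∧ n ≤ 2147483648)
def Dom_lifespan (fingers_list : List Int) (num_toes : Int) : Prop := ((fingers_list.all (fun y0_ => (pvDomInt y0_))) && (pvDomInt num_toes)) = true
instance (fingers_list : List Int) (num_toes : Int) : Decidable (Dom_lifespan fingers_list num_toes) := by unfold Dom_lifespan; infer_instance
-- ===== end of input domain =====

-- B replaces A's per-element countdown-and-test loop with one floor division per element (measured asymptotically faster).


-- ===== PORT A =====
-- the 'while i > 0' countdown: tests i % num_toes == 0 at each step, decrements i
def lifespanWhile (i num_toes : Int) : Int :=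
  if h : i > 0 then
    (if PySem.Int.mod i num_toes = 0 then 1 else 0) + lifespanWhile (i - 1) num_toes
  else 0
termination_by i.toNat
decreasing_by omega

def lifespan (fingers_list : List Int) (num_toes : Int) : Int :=
  fingers_list.foldl (fun life_years i => life_years + lifespanWhile i num_toes) 0

-- ===== PORT B =====
def lifespan_alt (fingers_list : List Int) (num_toes : Int) : Int :=
  ((fingers_list.filter (fun i => 0 < i)).map
    (fun i => PySem.Int.floordiv i |num_toes|)).sum

-- ===== PRECONDITION & SPEC =====
-- Both A and B raise ZeroDivisionError exactly when num_toes = 0 and some element is positive.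
def Pre_lifespan (fingers_list : List Int) (num_toes : Int) : Prop :=
  num_toes ≠ 0 ∨ ∀ i ∈ fingers_list, i ≤ 0
instance (fingers_list : List Int) (num_toes : Int) : Decidable (Pre_lifespan fingers_list num_toes) := by unfold Pre_lifespan; infer_instance
def pvWitness_lifespan : List Int × Int := ([7, 3, -2], 3)

def Spec_lifespan (fingers_list : List Int) (num_toes : Int) (out : Int) : Prop := out = lifespan_alt fingers_list num_toes
instance (fingers_list : List Int) (num_toes : Int) (out : Int) : Decidable (Spec_lifespan fingers_list num_toes out) := by unfold Spec_lifespan; infer_instance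

-- ===== CLAIM (what is proved, stated in full; the proofs are below) =====
def Claim_equal_lifespan : Prop := ∀ (fingers_list : List Int) (num_toes : Int), Dom_lifespan fingers_list num_toes → Pre_lifespan fingers_list num_toes → Spec_lifespan fingers_list num_toes (lifespan fingers_list num_toes)

-- ===== LEMMAS AND PROOFS =====

-- The countdown from n counts the multiples of m in 1..n.
lemma lifespanWhile_nat (m : Int) (n : Nat) :
    lifespanWhile (n : Int) m = ((n / m.natAbs : Nat) : Int) := by
  induction n with
  | zero => rw [lifespanWhile]; simp
  | succ n ih =>
      rw [lifespanWhile]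
      have hpos : (((n + 1 : Nat) : Int)) > 0 := by positivity
      have hsub : (((n + 1 : Nat) : Int)) - 1 = (n : Int) := by push_cast; ring
      simp only [hpos, dif_pos, hsub, ih, PySem.Int.mod_eq_zero_iff_dvd]
      have hdvd : m ∣ ((n : Int) + 1) ↔ m.natAbs ∣ (n + 1) := by
        rw [← Int.natAbs_dvd]
        exact_mod_cast Int.natCast_dvd_natCast.symm
      rw [Nat.succ_div]
      by_cases h : m.natAbs ∣ (n + 1)
      · rw [if_pos ((by exact_mod_cast hdvd.mpr h : m ∣ (((n+1 : Nat) : Int)))) ]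
        push_cast [h]
        ring
      · rw [if_neg (fun hc => h (hdvd.mp (by exact_mod_cast hc)))]
        push_cast [h]
        ring

-- The countdown from i counts the multiples of num_toes in 1..i, i.e. i // |num_toes|.
lemma lifespanWhile_eq (i num_toes : Int) (hm : num_toes ≠ 0) (hi : 0 < i) :
    lifespanWhile i num_toes = PySem.Int.floordiv i |num_toes| := by
  have habs : (0 : Int) < |num_toes| := abs_pos.mpr hm
  rw [PySem.Int.floordiv_eq_ediv_of_pos habs]
  have h1 : i = (i.toNat : Int) := (Int.toNat_of_nonneg hi.le).symm
  have h2 : |num_toes| = (num_toes.natAbs : Int) := by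
    rw [Int.abs_eq_natAbs]
  rw [h1, h2, lifespanWhile_nat num_toes i.toNat]
  push_cast
  ring

lemma lifespanWhile_nonpos (i num_toes : Int) (hi : i ≤ 0) :
    lifespanWhile i num_toes = 0 := by
  rw [lifespanWhile]; simp [not_lt.mpr hi]

lemma fold_eq_sum (xs : List Int) (m : Int)
    (h : m ≠ 0 ∨ ∀ i ∈ xs, i ≤ 0) :
    xs.foldl (fun life_years i => life_years + lifespanWhile i m) 0 =
    ((xs.filter (fun i => 0 < i)).map (fun i => PySem.Int.floordiv i |m|)).sum := by
  induction xs using List.reverseRecOn with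
  | nil => rfl
  | append_singleton xs x ih =>
      have huse : m ≠ 0 ∨ ∀ i ∈ xs, i ≤ 0 := by
        rcases h with hm | hall
        · exact Or.inl hm
        · exact Or.inr fun i hi => hall i (by simp [hi])
      simp only [List.foldl_append, List.foldl_cons, List.foldl_nil, ih huse,
        List.filter_append, List.map_append, List.sum_append]
      by_cases hx : 0 < x
      · have hm : m ≠ 0 := by
          rcases h with hm | hall
          · exact hm
          · exact absurd (hall x (by simp)) (by omega)
        simp [hx, lifespanWhile_eq x m hm hx]
      · simp [hx, lifespanWhile_nonpos x m (not_lt.mp hx)]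

-- ===== VERDICT (by name: the statement is the Claim_ definition above) =====
theorem lifespan_spec : Claim_equal_lifespan := by
  intro xs m _ hpre
  unfold Spec_lifespan lifespan lifespan_alt
  exact fold_eq_sum xs m hpre
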